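-- pv_equiv track=rewrite | github.com/CorneyHeY/Poison-Attack-LDP-Frequent-Itemset-Mining-CCS2024 | data/aux_func.py | check_tuple_list
-- ===== SOURCE A (Python) =====
-- def check_tuple_list(lst, yellow_list=[], blue_list=[]):
--     def to_string(tp: tuple):
--         string = "("
--         for t in tp[:-1]:
--             string += "%s," % t
--         string += "%s)" % tp[-1]
--         return string
--
--
--     result = "["
--     yellow_num = 0
--     blue_num = 0
--     for i in range(len(lst)):
--         item = lst[i]
--         if item in yellow_list and item in blue_list:
--             result += '?%s? ' % to_string(item)
--             yellow_num, blue_num = yellow_num + 1, blue_num + 1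
--         elif item in yellow_list:
--             result += '|%s| ' % to_string(item)
--             yellow_num = yellow_num + 1
--         elif item in blue_list:
--             result += '{%s} ' % to_string(item)
--             blue_num = blue_num + 1
--         else:
--             result += '%s ' % to_string(item)
--         if i % 5 == 4:
--             result += '\n'
--     result += "]\n"
--     result += "num of || = %d, num of {} = %d" % (yellow_num, blue_num)
--     return result
-- ===== SOURCE B (Python) =====
-- def check_tuple_list(lst, yellow_list=[], blue_list=[]):
--     yellow_num = sum(1 for x in lst if x in yellow_list)
--     blue_num = sum(1 for x in lst if x in blue_list)
--
--     def fmt(tp):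
--         return "(" + ",".join(str(t) for t in tp) + ")"
--
--     delims = {(True, True): ("?", "? "), (True, False): ("|", "| "),
--               (False, True): ("{", "} "), (False, False): ("", " ")}
--
--     def token(x):
--         l, r = delims[(x in yellow_list, x in blue_list)]
--         return l + fmt(x) + r
--
--     tokens = [token(x) for x in lst]
--     body = ""
--     for i in range(0, len(tokens), 5):
--         group = tokens[i:i + 5]
--         body += "".join(group)
--         if len(group) == 5:
--             body += "\n"
--     return "[" + body + "]\n" + "num of || = %d, num of {} = %d" % (yellow_num, blue_num)
-- ===== Notes on version B (the rewrite author's own statement) =====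
-- stated objective: alternative
-- what changed: A's single interleaved loop (branch chain mutating result/yellow_num/blue_num plus per-index newline logic) is split into three separate concerns: membership counts computed directly as sums over lst, per-item tokens built from a (in_yellow, in_blue) delimiter table with ','.join formatting, and the body assembled by joining the token list in groups of five.
import Mathlib
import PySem

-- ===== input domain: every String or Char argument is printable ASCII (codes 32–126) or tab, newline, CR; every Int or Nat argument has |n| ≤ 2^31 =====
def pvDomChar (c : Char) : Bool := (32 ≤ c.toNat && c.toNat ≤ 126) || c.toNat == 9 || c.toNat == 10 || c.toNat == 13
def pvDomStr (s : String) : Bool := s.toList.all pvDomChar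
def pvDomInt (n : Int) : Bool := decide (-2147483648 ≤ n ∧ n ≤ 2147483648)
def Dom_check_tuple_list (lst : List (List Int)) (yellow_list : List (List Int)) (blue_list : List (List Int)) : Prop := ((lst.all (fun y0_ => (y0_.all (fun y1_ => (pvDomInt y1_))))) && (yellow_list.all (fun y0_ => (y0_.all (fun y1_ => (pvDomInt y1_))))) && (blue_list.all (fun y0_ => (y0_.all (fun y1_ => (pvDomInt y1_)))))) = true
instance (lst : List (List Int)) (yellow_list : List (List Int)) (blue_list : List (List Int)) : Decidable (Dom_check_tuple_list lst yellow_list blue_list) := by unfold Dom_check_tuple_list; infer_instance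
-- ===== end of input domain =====

-- B separates the three concerns (membership counts, per-item token formatting, chunk-of-5 body
-- assembly) instead of A's single interleaved loop; same cost, clearer structure (objective: alternative).

-- ===== PORT A =====
-- A's inner to_string: "(" then "%s," for each t in tp[:-1], then "%s)" for tp[-1]
-- (tp[-1] raises IndexError on an empty tuple — those inputs are excluded by Pre_; the
-- 'none' branch just returns the partial string, it is never reached inside Pre_).
def pvToStringA (tp : List Int) : List Char :=
  let s : List Char := ['(']
  let s := (PySem.List.slice tp none (some (-1))).foldl
      (fun (s : List Char) t => s ++ PySem.Int.toChars t ++ [',']) s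
  match PySem.List.pyGet? tp (-1) with
  | some v => s ++ PySem.Int.toChars v ++ [')']
  | none => s

-- A's main for-loop over range(len(lst)) as structural recursion on the same state
def pvLoopA (yl bl : List (List Int)) : Int → List (List Int) → List Char × Int × Int → List Char × Int × Int
  | _, [], st => st
  | i, item :: rest, (result, yn, bn) =>
    let st : List Char × Int × Int :=
      if item ∈ yl ∧ item ∈ bl then (result ++ ['?'] ++ pvToStringA item ++ ['?', ' '], yn + 1, bn + 1)
      else if item ∈ yl then (result ++ ['|'] ++ pvToStringA item ++ ['|', ' '], yn + 1, bn)
      else if item ∈ bl then (result ++ ['{'] ++ pvToStringA item ++ ['}', ' '], yn, bn + 1)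
      else (result ++ pvToStringA item ++ [' '], yn, bn)
    let st : List Char × Int × Int :=
      if PySem.Int.mod i 5 = 4 then (st.1 ++ ['\n'], st.2.1, st.2.2) else st
    pvLoopA yl bl (i + 1) rest st

def check_tuple_list (lst : List (List Int)) (yellow_list : List (List Int)) (blue_list : List (List Int)) : String :=
  let st := pvLoopA yellow_list blue_list 0 lst (['['], 0, 0)
  String.ofList (st.1 ++ [']', '\n'] ++ "num of || = ".toList ++ PySem.Int.toChars st.2.1
      ++ ", num of {} = ".toList ++ PySem.Int.toChars st.2.2)

-- ===== PORT B =====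
def pvFmtB (tp : List Int) : List Char :=
  ['('] ++ PySem.Chars.join [','] (tp.map PySem.Int.toChars) ++ [')']

def pvDelims (inY inB : Bool) : List Char × List Char :=
  match inY, inB with
  | true,  true  => (['?'], ['?', ' '])
  | true,  false => (['|'], ['|', ' '])
  | false, true  => (['{'], ['}', ' '])
  | false, false => ([],    [' '])

def pvToken (yl bl : List (List Int)) (x : List Int) : List Char :=
  let d := pvDelims (decide (x ∈ yl)) (decide (x ∈ bl))
  d.1 ++ pvFmtB x ++ d.2

-- B's body loop: consume the token list five at a time ('\\n' after each full group),
-- a final partial group is joined without the newline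
def pvBodyB : List (List Char) → List Char
  | a :: b :: c :: d :: e :: rest => a ++ b ++ c ++ d ++ e ++ ['\n'] ++ pvBodyB rest
  | toks => toks.flatten

def check_tuple_list_alt (lst : List (List Int)) (yellow_list : List (List Int)) (blue_list : List (List Int)) : String :=
  let yn : Int := (lst.countP (· ∈ yellow_list) : Int)
  let bn : Int := (lst.countP (· ∈ blue_list) : Int)
  String.ofList (['['] ++ pvBodyB (lst.map (pvToken yellow_list blue_list)) ++ [']', '\n']
      ++ "num of || = ".toList ++ PySem.Int.toChars yn
      ++ ", num of {} = ".toList ++ PySem.Int.toChars bn)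

-- ===== PRECONDITION & SPEC =====
-- Pre_ excludes lists whose ITEMS contain an empty tuple: A's to_string evaluates tp[-1] and
-- raises IndexError there (B returns "()" for it).
def Pre_check_tuple_list (lst : List (List Int)) (yellow_list : List (List Int)) (blue_list : List (List Int)) : Prop :=
  ∀ item ∈ lst, item ≠ []
instance (lst : List (List Int)) (yellow_list : List (List Int)) (blue_list : List (List Int)) : Decidable (Pre_check_tuple_list lst yellow_list blue_list) := by unfold Pre_check_tuple_list; infer_instance

def pvWitness_check_tuple_list : List (List Int) × List (List Int) × List (List Int) :=
  ([[1], [2, 3], [4]], [[1], [4]], [[2, 3], [4]])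

def Spec_check_tuple_list (lst : List (List Int)) (yellow_list : List (List Int)) (blue_list : List (List Int)) (out : String) : Prop := out = check_tuple_list_alt lst yellow_list blue_list
instance (lst : List (List Int)) (yellow_list : List (List Int)) (blue_list : List (List Int)) (out : String) : Decidable (Spec_check_tuple_list lst yellow_list blue_list out) := by unfold Spec_check_tuple_list; infer_instance

-- ===== CLAIM (what is proved, stated in full; the proofs are below) =====
def Claim_equal_check_tuple_list : Prop := ∀ (lst : List (List Int)) (yellow_list : List (List Int)) (blue_list : List (List Int)), Dom_check_tuple_list lst yellow_list blue_list → Pre_check_tuple_list lst yellow_list blue_list → Spec_check_tuple_list lst yellow_list blue_list (check_tuple_list lst yellow_list blue_list)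


-- ===== LEMMAS AND PROOFS =====

-- A's foldl of "s += str(t) + ','" as a flat concatenation
theorem pvFoldlComma (l : List Int) (s : List Char) :
    l.foldl (fun (s : List Char) t => s ++ PySem.Int.toChars t ++ [',']) s
      = s ++ (l.map (fun t => PySem.Int.toChars t ++ [','])).flatten := by
  induction l generalizing s with
  | nil => simp
  | cons a t ih => simp [ih]

theorem pvJoinSnoc (l : List Int) (x : Int) :
    PySem.Chars.join [','] (l.map PySem.Int.toChars ++ [PySem.Int.toChars x])
      = (l.map (fun t => PySem.Int.toChars t ++ [','])).flatten ++ PySem.Int.toChars x := by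
  induction l with
  | nil => simp [PySem.Chars.join_singleton]
  | cons a t ih =>
    cases t with
    | nil => simp [PySem.Chars.join_cons_cons, PySem.Chars.join_singleton]
    | cons b u =>
      simp only [List.map_cons, List.cons_append, PySem.Chars.join_cons_cons] at ih ⊢
      rw [ih]
      simp [List.append_assoc]

theorem pvToStringA_eq (tp : List Int) (h : tp ≠ []) : pvToStringA tp = pvFmtB tp := by
  obtain ⟨l, x, rfl⟩ : ∃ l x, tp = l ++ [x] := ⟨tp.dropLast, tp.getLast h, (List.dropLast_append_getLast h).symm⟩
  simp [pvToStringA, pvFmtB, PySem.List.slice_to_neg_one, PySem.List.pyGet?_neg_one_append_singleton,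
    pvFoldlComma, pvJoinSnoc]

-- the interleaved body A builds, starting at index i
def pvBodyFrom (yl bl : List (List Int)) : Int → List (List Int) → List Char
  | _, [] => []
  | i, x :: rest =>
      pvToken yl bl x ++ (if PySem.Int.mod i 5 = 4 then ['\n'] else []) ++ pvBodyFrom yl bl (i + 1) rest

-- A's loop = prefix ++ interleaved body, counts = start + membership counts
theorem pvLoopA_eq (yl bl : List (List Int)) (l : List (List Int)) (hne : ∀ t ∈ l, t ≠ []) :
    ∀ (i : Int) (s : List Char) (y b : Int),
    pvLoopA yl bl i l (s, y, b)
      = (s ++ pvBodyFrom yl bl i l, y + (l.countP (· ∈ yl) : Int), b + (l.countP (· ∈ bl) : Int)) := by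
  induction l with
  | nil => intro i s y b; simp [pvLoopA, pvBodyFrom]
  | cons x rest ih =>
    intro i s y b
    have hx : pvToStringA x = pvFmtB x := pvToStringA_eq x (hne x (by simp))
    have hr : ∀ t ∈ rest, t ≠ [] := fun t ht => hne t (by simp [ht])
    have hcY : ((x :: rest).countP (· ∈ yl) : Int)
        = (if x ∈ yl then 1 else 0) + (rest.countP (· ∈ yl) : Int) := by
      by_cases hxy : x ∈ yl
      · simp [List.countP_cons, hxy]; push_cast; ring
      · simp [List.countP_cons, hxy]
    have hcB : ((x :: rest).countP (· ∈ bl) : Int)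
        = (if x ∈ bl then 1 else 0) + (rest.countP (· ∈ bl) : Int) := by
      by_cases hxb : x ∈ bl
      · simp [List.countP_cons, hxb]; push_cast; ring
      · simp [List.countP_cons, hxb]
    have hmod : ∀ a : Int, PySem.Int.mod a 5 = a % 5 := fun a => PySem.Int.mod_eq_emod_of_pos (by norm_num)
    by_cases hy : x ∈ yl <;> by_cases hb : x ∈ bl <;>
      by_cases hm : i % 5 = 4 <;>
      simp [pvLoopA, pvBodyFrom, pvToken, pvDelims, hy, hb, hmod, hm, hx, ih hr, hcY, hcB] <;>
      (try ring_nf) <;> (try simp [List.append_assoc])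

theorem pvBodyFrom_shift (yl bl : List (List Int)) (l : List (List Int)) :
    ∀ (i : Int), 0 ≤ i → pvBodyFrom yl bl (i + 5) l = pvBodyFrom yl bl i l := by
  induction l with
  | nil => intro i _; rfl
  | cons x rest ih =>
    intro i hi
    have hmod : ∀ a : Int, PySem.Int.mod a 5 = a % 5 := fun a => PySem.Int.mod_eq_emod_of_pos (by norm_num)
    have hm : PySem.Int.mod (i + 5) 5 = PySem.Int.mod i 5 := by rw [hmod, hmod]; omega
    have : i + 5 + 1 = (i + 1) + 5 := by ring
    simp [pvBodyFrom, hm, this, ih (i + 1) (by omega)]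

theorem pvChunk (yl bl : List (List Int)) :
    ∀ (l : List (List Int)), pvBodyFrom yl bl 0 l = pvBodyB (l.map (pvToken yl bl))
  | [] => by simp [pvBodyFrom, pvBodyB]
  | [a] => by simp [pvBodyFrom, pvBodyB]
  | [a, b] => by simp [pvBodyFrom, pvBodyB]
  | [a, b, c] => by simp [pvBodyFrom, pvBodyB]
  | [a, b, c, d] => by simp [pvBodyFrom, pvBodyB]
  | a :: b :: c :: d :: e :: rest => by
    have h5 : pvBodyFrom yl bl 5 rest = pvBodyFrom yl bl 0 rest := by
      have := pvBodyFrom_shift yl bl rest 0 (by norm_num)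
      simpa using this
    simp [pvBodyFrom, pvBodyB, h5, pvChunk yl bl rest]

-- ===== VERDICT (by name: the statement is the Claim_ definition above) =====
theorem check_tuple_list_spec : Claim_equal_check_tuple_list := by
  intro lst yl bl _ hpre
  unfold Spec_check_tuple_list check_tuple_list check_tuple_list_alt
  simp only [pvLoopA_eq yl bl lst hpre 0 ['['] 0 0, pvChunk]
  simp
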